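-- pv_equiv track=rewrite | github.com/xinbo751-ctrl/learning_notes | utils/fetch_sec_edgar.py | pick_taxonomy_files
-- ===== SOURCE A (Python) =====
-- from typing import Dict, List, Optional
--
-- def pick_taxonomy_files(items: List[Dict]) -> Dict[str, str]:
--     """Pick taxonomy/linkbase files: .xsd, _pre.xml, _cal.xml, _def.xml, _lab.xml"""
--     names = [it.get("name", "") for it in items if isinstance(it, dict)]
--     result = {}
--
--     # Schema file (.xsd)
--     for n in names:
--         if n.endswith(".xsd") and not n.startswith("http"):
--             result["schema"] = n
--             break
--
--     # Presentation linkbase (_pre.xml)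
--     for n in names:
--         if "_pre.xml" in n:
--             result["presentation"] = n
--             break
--
--     # Calculation linkbase (_cal.xml)
--     for n in names:
--         if "_cal.xml" in n:
--             result["calculation"] = n
--             break
--
--     # Definition linkbase (_def.xml)
--     for n in names:
--         if "_def.xml" in n:
--             result["definition"] = n
--             break
--
--     # Label linkbase (_lab.xml)
--     for n in names:
--         if "_lab.xml" in n:
--             result["label"] = n
--             break
--
--     return result
-- ===== SOURCE B (Python) =====
-- def pick_taxonomy_files(items):
--     """Single pass: record the first match per category, then assemble the dict."""
--     schema = pres = cal = deff = lab = None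
--     for it in items:
--         if not isinstance(it, dict):
--             continue
--         n = it.get("name", "")
--         if schema is None and n.endswith(".xsd") and not n.startswith("http"):
--             schema = n
--         if pres is None and "_pre.xml" in n:
--             pres = n
--         if cal is None and "_cal.xml" in n:
--             cal = n
--         if deff is None and "_def.xml" in n:
--             deff = n
--         if lab is None and "_lab.xml" in n:
--             lab = n
--     result = {}
--     for key, val in (("schema", schema), ("presentation", pres),
--                      ("calculation", cal), ("definition", deff), ("label", lab)):
--         if val is not None:
--             result[key] = val
--     return result
-- ===== Notes on version B (the rewrite author's own statement) =====
-- stated objective: simpler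
-- what changed: A's five separate scans over the names (one per category, each breaking at the first match) are fused into a single pass that records the first match for each of the five categories, after which the result dict is assembled in the fixed key order.
import Mathlib
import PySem

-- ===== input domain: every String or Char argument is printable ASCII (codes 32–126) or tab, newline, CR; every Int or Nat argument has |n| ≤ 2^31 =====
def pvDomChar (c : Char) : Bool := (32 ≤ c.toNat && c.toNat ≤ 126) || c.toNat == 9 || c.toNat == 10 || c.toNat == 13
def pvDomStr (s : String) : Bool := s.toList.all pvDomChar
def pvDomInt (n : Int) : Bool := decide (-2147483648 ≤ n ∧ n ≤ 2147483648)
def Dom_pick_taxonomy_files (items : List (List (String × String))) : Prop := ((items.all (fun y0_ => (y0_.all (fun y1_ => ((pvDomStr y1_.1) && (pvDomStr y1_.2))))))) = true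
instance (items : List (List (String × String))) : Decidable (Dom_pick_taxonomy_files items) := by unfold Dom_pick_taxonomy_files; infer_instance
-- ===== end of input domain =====

-- B fuses A's five scans into one pass that records the first match per category (objective: simpler single traversal).

-- the five category predicates (identical in A and B)
def pvIsSchema (n : String) : Bool := PySem.Str.endswith n ".xsd" && !(PySem.Str.startswith n "http")
def pvIsPre (n : String) : Bool := PySem.Str.isIn "_pre.xml" n
def pvIsCal (n : String) : Bool := PySem.Str.isIn "_cal.xml" n
def pvIsDef (n : String) : Bool := PySem.Str.isIn "_def.xml" n
def pvIsLab (n : String) : Bool := PySem.Str.isIn "_lab.xml" n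

-- ===== PORT A =====
-- 'for n in names: if p n: result[key] = n; break'
def pvLoopA (p : String → Bool) (key : String) (names : List String)
    (d : PySem.Dict String String) : PySem.Dict String String :=
  match names with
  | [] => d
  | n :: t => if p n then d.insert key n else pvLoopA p key t d

def pick_taxonomy_files (items : List (List (String × String))) : List (String × String) :=
  let names := items.map (fun it => (PySem.Dict.mk it).getD "name" "")
  let d : PySem.Dict String String := PySem.Dict.mk []
  let d := pvLoopA pvIsSchema "schema" names d
  let d := pvLoopA pvIsPre "presentation" names d
  let d := pvLoopA pvIsCal "calculation" names d
  let d := pvLoopA pvIsDef "definition" names d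
  let d := pvLoopA pvIsLab "label" names d
  d.items

-- ===== PORT B =====
-- one fold over the names, keeping the first match for each of the five categories
def pvStepB (st : Option String × Option String × Option String × Option String × Option String)
    (n : String) : Option String × Option String × Option String × Option String × Option String :=
  let (s, p, c, df, l) := st
  ( if s.isNone && pvIsSchema n then some n else s,
    if p.isNone && pvIsPre n then some n else p,
    if c.isNone && pvIsCal n then some n else c,
    if df.isNone && pvIsDef n then some n else df,
    if l.isNone && pvIsLab n then some n else l )

def pick_taxonomy_files_alt (items : List (List (String × String))) : List (String × String) :=
  let names := items.map (fun it => (PySem.Dict.mk it).getD "name" "")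
  let st := names.foldl pvStepB (none, none, none, none, none)
  let pairs := [("schema", st.1), ("presentation", st.2.1), ("calculation", st.2.2.1),
                ("definition", st.2.2.2.1), ("label", st.2.2.2.2)]
  (pairs.foldl (fun (d : PySem.Dict String String) kv =>
      match kv.2 with
      | some v => d.insert kv.1 v
      | none => d) (PySem.Dict.mk [])).items

-- ===== PRECONDITION & SPEC =====
def Spec_pick_taxonomy_files (items : List (List (String × String))) (out : List (String × String)) : Prop := out = pick_taxonomy_files_alt items
instance (items : List (List (String × String))) (out : List (String × String)) : Decidable (Spec_pick_taxonomy_files items out) := by unfold Spec_pick_taxonomy_files; infer_instance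

-- ===== CLAIM (what is proved, stated in full; the proofs are below) =====
def Claim_equal_pick_taxonomy_files : Prop := ∀ (items : List (List (String × String))), Dom_pick_taxonomy_files items → Spec_pick_taxonomy_files items (pick_taxonomy_files items)

-- ===== LEMMAS AND PROOFS =====

-- A's break-loop is "first match"
theorem pvLoopA_eq_find (p : String → Bool) (key : String) (names : List String)
    (d : PySem.Dict String String) :
    pvLoopA p key names d =
      (match names.find? p with
       | some n => d.insert key n
       | none => d) := by
  induction names with
  | nil => rfl
  | cons n t ih =>
    by_cases h : p n = true
    · simp [pvLoopA, List.find?, h]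
    · simp only [Bool.not_eq_true] at h
      simp [pvLoopA, List.find?, h, ih]

-- B's fold computes the five first matches
theorem pvFoldB_eq_find (names : List String)
    (s p c df l : Option String) :
    names.foldl pvStepB (s, p, c, df, l) =
      ( s.or (names.find? pvIsSchema),
        p.or (names.find? pvIsPre),
        c.or (names.find? pvIsCal),
        df.or (names.find? pvIsDef),
        l.or (names.find? pvIsLab) ) := by
  induction names generalizing s p c df l with
  | nil => cases s <;> cases p <;> cases c <;> cases df <;> cases l <;> rfl
  | cons n t ih =>
    simp only [List.foldl_cons, pvStepB, List.find?]
    rw [ih]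
    cases s <;> cases p <;> cases c <;> cases df <;> cases l <;>
      cases hs : pvIsSchema n <;> cases hp : pvIsPre n <;> cases hc : pvIsCal n <;>
      cases hd : pvIsDef n <;> cases hl : pvIsLab n <;> simp

-- both assemblies over the same five options produce the same items list
theorem pvAssemble_eq (o1 o2 o3 o4 o5 : Option String) :
    (let d : PySem.Dict String String := PySem.Dict.mk []
     let d := (match o1 with | some n => d.insert "schema" n | none => d)
     let d := (match o2 with | some n => d.insert "presentation" n | none => d)
     let d := (match o3 with | some n => d.insert "calculation" n | none => d)
     let d := (match o4 with | some n => d.insert "definition" n | none => d)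
     let d := (match o5 with | some n => d.insert "label" n | none => d)
     d.items) =
    ([("schema", o1), ("presentation", o2), ("calculation", o3),
      ("definition", o4), ("label", o5)].foldl (fun (d : PySem.Dict String String) kv =>
        match kv.2 with
        | some v => d.insert kv.1 v
        | none => d) (PySem.Dict.mk [])).items := by
  cases o1 <;> cases o2 <;> cases o3 <;> cases o4 <;> cases o5 <;> rfl

-- ===== VERDICT (by name: the statement is the Claim_ definition above) =====
theorem pick_taxonomy_files_spec : Claim_equal_pick_taxonomy_files := by
  intro items _
  unfold Spec_pick_taxonomy_files pick_taxonomy_files pick_taxonomy_files_alt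
  simp only [pvLoopA_eq_find, pvFoldB_eq_find, Option.none_or]
  exact pvAssemble_eq _ _ _ _ _
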